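-- pv_equiv track=rewrite | github.com/florencecornelissen/ODIR_challenge | preprocessing_pipeline_wo_control.py | classify_keywords
-- ===== SOURCE A (Python) =====
-- def classify_keywords(keywords, df_row):
--     classified_diseases = []
--     if 'normal' in keywords.lower():
--         classified_diseases.append('N')
--     if ('diabetes' in keywords.lower() or 'diabetic' in keywords.lower() or 'proliferative retinopathy' in keywords.lower()) and df_row['D'] == 1:
--         classified_diseases.append('D')
--     if 'glaucoma' in keywords.lower() and df_row['G'] == 1:
--         classified_diseases.append('G')
--     if 'cataract' in keywords.lower() and df_row['C'] == 1:
--         classified_diseases.append('C')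
--     if ('amd' in keywords.lower() or 'age-related macular degeneration' in keywords.lower()) and df_row['A'] == 1:
--         classified_diseases.append('A')
--     if ('hypertension' in keywords.lower() or 'hypertensive' in keywords.lower()) and df_row['H'] == 1:
--         classified_diseases.append('H')
--     if ('myopia' in keywords.lower() or 'myopic' in keywords.lower()) and df_row['M'] == 1:
--         classified_diseases.append('M')
--     if any(name in keywords.lower() for name in disease_names):
--         classified_diseases.append('O')
--     if not classified_diseases:
--         classified_diseases.append('O')
--     return classified_diseases
--
-- disease_names = [
--     'laser', 'drusen', 'pigment', 'epiretinal membrane',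
--     'maculopathy', 'vitreous degeneration', 'myelinated nerve fibers',
--     'refractive media opacity', 'tessellated fundus', 'atrophy',
--     'spotted membranous change', 'occlusion', 'syndrome',
--     'neovascularization', 'sheathing', 'coloboma', 'edema'
-- ]
-- ===== SOURCE B (Python) =====
-- disease_names = [
--     'laser', 'drusen', 'pigment', 'epiretinal membrane',
--     'maculopathy', 'vitreous degeneration', 'myelinated nerve fibers',
--     'refractive media opacity', 'tessellated fundus', 'atrophy',
--     'spotted membranous change', 'occlusion', 'syndrome',
--     'neovascularization', 'sheathing', 'coloboma', 'edema'
-- ]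
--
-- # inverted index: keyword -> label it triggers
-- KEYWORD_LABEL = [
--     ('normal', 'N'),
--     ('diabetes', 'D'), ('diabetic', 'D'), ('proliferative retinopathy', 'D'),
--     ('glaucoma', 'G'),
--     ('cataract', 'C'),
--     ('amd', 'A'), ('age-related macular degeneration', 'A'),
--     ('hypertension', 'H'), ('hypertensive', 'H'),
--     ('myopia', 'M'), ('myopic', 'M'),
-- ]
--
-- def classify_keywords(keywords, df_row):
--     text = keywords.lower()
--     # stage 1: which labels have a triggering keyword in the text
--     hits = [lab for kw, lab in KEYWORD_LABEL if kw in text]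
--     # stage 2: emit in canonical order, gated by the df flag (N has no flag)
--     out = [lab for lab in 'NDGCAHM'
--            if lab in hits and (lab == 'N' or df_row[lab] == 1)]
--     if any(name in text for name in disease_names):
--         out.append('O')
--     return out or ['O']
-- ===== Notes on version B (the rewrite author's own statement) =====
-- stated objective: alternative
-- what changed: Replaces A's eight-branch if-chain with a two-stage pipeline over an inverted keyword->label index: stage one scans the index once to collect the labels whose keyword occurs in the lowercased text, stage two emits labels in the fixed canonical order 'NDGCAHM' gated by the df flag, then the O-scan and empty fallback.
import Mathlib
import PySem

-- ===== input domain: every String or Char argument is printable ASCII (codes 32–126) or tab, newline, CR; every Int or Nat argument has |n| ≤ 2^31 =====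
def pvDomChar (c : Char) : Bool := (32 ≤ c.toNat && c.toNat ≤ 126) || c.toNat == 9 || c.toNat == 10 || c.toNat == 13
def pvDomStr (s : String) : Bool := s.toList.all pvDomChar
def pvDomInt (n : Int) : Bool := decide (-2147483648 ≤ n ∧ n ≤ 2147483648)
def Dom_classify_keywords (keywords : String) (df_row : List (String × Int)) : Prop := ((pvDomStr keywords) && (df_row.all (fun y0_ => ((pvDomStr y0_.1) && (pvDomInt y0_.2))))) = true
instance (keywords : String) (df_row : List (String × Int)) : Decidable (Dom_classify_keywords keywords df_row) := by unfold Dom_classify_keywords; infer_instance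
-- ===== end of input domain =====

-- B replaces A's eight-branch if-chain by a two-stage pipeline over an inverted keyword->label
-- index (collect hit labels, then emit them in canonical order gated by the df flag); objective: alternative.

-- ===== PORT A =====
def disease_names : List String := [
  "laser", "drusen", "pigment", "epiretinal membrane",
  "maculopathy", "vitreous degeneration", "myelinated nerve fibers",
  "refractive media opacity", "tessellated fundus", "atrophy",
  "spotted membranous change", "occlusion", "syndrome",
  "neovascularization", "sheathing", "coloboma", "edema"]

-- df_row[k] == 1 is ported as get? … == some 1; Pre_ excludes the inputs where Python raises KeyError.
def classify_keywords (keywords : String) (df_row : List (String × Int)) : List String :=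
  let l0 : List String := []
  let l1 := if PySem.Str.isIn "normal" (PySem.Str.lower keywords) then l0 ++ ["N"] else l0
  let l2 := if (PySem.Str.isIn "diabetes" (PySem.Str.lower keywords) || PySem.Str.isIn "diabetic" (PySem.Str.lower keywords) || PySem.Str.isIn "proliferative retinopathy" (PySem.Str.lower keywords)) && ((PySem.Dict.mk df_row).get? "D" == some 1) then l1 ++ ["D"] else l1
  let l3 := if PySem.Str.isIn "glaucoma" (PySem.Str.lower keywords) && ((PySem.Dict.mk df_row).get? "G" == some 1) then l2 ++ ["G"] else l2
  let l4 := if PySem.Str.isIn "cataract" (PySem.Str.lower keywords) && ((PySem.Dict.mk df_row).get? "C" == some 1) then l3 ++ ["C"] else l3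
  let l5 := if (PySem.Str.isIn "amd" (PySem.Str.lower keywords) || PySem.Str.isIn "age-related macular degeneration" (PySem.Str.lower keywords)) && ((PySem.Dict.mk df_row).get? "A" == some 1) then l4 ++ ["A"] else l4
  let l6 := if (PySem.Str.isIn "hypertension" (PySem.Str.lower keywords) || PySem.Str.isIn "hypertensive" (PySem.Str.lower keywords)) && ((PySem.Dict.mk df_row).get? "H" == some 1) then l5 ++ ["H"] else l5
  let l7 := if (PySem.Str.isIn "myopia" (PySem.Str.lower keywords) || PySem.Str.isIn "myopic" (PySem.Str.lower keywords)) && ((PySem.Dict.mk df_row).get? "M" == some 1) then l6 ++ ["M"] else l6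
  let l8 := if disease_names.any (fun name => PySem.Str.isIn name (PySem.Str.lower keywords)) then l7 ++ ["O"] else l7
  if l8.isEmpty then l8 ++ ["O"] else l8

-- ===== PORT B =====
-- inverted index: keyword -> label it triggers
def pvKeywordLabel : List (String × String) := [
  ("normal", "N"),
  ("diabetes", "D"), ("diabetic", "D"), ("proliferative retinopathy", "D"),
  ("glaucoma", "G"),
  ("cataract", "C"),
  ("amd", "A"), ("age-related macular degeneration", "A"),
  ("hypertension", "H"), ("hypertensive", "H"),
  ("myopia", "M"), ("myopic", "M")]

-- Python iterates over the string 'NDGCAHM'; its characters as one-char strings: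
def pvOrder : List String := ["N", "D", "G", "C", "A", "H", "M"]

def classify_keywords_alt (keywords : String) (df_row : List (String × Int)) : List String :=
  let text := PySem.Str.lower keywords
  let hits := pvKeywordLabel.filterMap (fun p => if PySem.Str.isIn p.1 text then some p.2 else none)
  let out := pvOrder.filter (fun lab => hits.contains lab && (lab == "N" || (PySem.Dict.mk df_row).get? lab == some 1))
  let out2 := if disease_names.any (fun name => PySem.Str.isIn name text) then out ++ ["O"] else out
  if out2.isEmpty then ["O"] else out2

-- ===== PRECONDITION & SPEC =====
-- Pre_ excludes exactly the inputs where A (and B) raise KeyError: a disease keyword occurs but its flag key is absent.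
def Pre_classify_keywords (keywords : String) (df_row : List (String × Int)) : Prop :=
  ((PySem.Str.isIn "diabetes" (PySem.Str.lower keywords) || PySem.Str.isIn "diabetic" (PySem.Str.lower keywords) || PySem.Str.isIn "proliferative retinopathy" (PySem.Str.lower keywords)) = true → ((PySem.Dict.mk df_row).get? "D").isSome = true) ∧
  (PySem.Str.isIn "glaucoma" (PySem.Str.lower keywords) = true → ((PySem.Dict.mk df_row).get? "G").isSome = true) ∧
  (PySem.Str.isIn "cataract" (PySem.Str.lower keywords) = true → ((PySem.Dict.mk df_row).get? "C").isSome = true) ∧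
  ((PySem.Str.isIn "amd" (PySem.Str.lower keywords) || PySem.Str.isIn "age-related macular degeneration" (PySem.Str.lower keywords)) = true → ((PySem.Dict.mk df_row).get? "A").isSome = true) ∧
  ((PySem.Str.isIn "hypertension" (PySem.Str.lower keywords) || PySem.Str.isIn "hypertensive" (PySem.Str.lower keywords)) = true → ((PySem.Dict.mk df_row).get? "H").isSome = true) ∧
  ((PySem.Str.isIn "myopia" (PySem.Str.lower keywords) || PySem.Str.isIn "myopic" (PySem.Str.lower keywords)) = true → ((PySem.Dict.mk df_row).get? "M").isSome = true)
instance (keywords : String) (df_row : List (String × Int)) : Decidable (Pre_classify_keywords keywords df_row) := by unfold Pre_classify_keywords; infer_instance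

def pvWitness_classify_keywords : String × (List (String × Int)) := ("cataract", [("C", 1)])

def Spec_classify_keywords (keywords : String) (df_row : List (String × Int)) (out : List String) : Prop := out = classify_keywords_alt keywords df_row
instance (keywords : String) (df_row : List (String × Int)) (out : List String) : Decidable (Spec_classify_keywords keywords df_row out) := by unfold Spec_classify_keywords; infer_instance

-- ===== CLAIM (what is proved, stated in full; the proofs are below) =====
def Claim_equal_classify_keywords : Prop := ∀ (keywords : String) (df_row : List (String × Int)), Dom_classify_keywords keywords df_row → Pre_classify_keywords keywords df_row → Spec_classify_keywords keywords df_row (classify_keywords keywords df_row)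

-- ===== LEMMAS AND PROOFS =====
theorem contains_guard (b : Bool) (x y : String) :
    (if b then [x] else ([] : List String)).contains y = (b && decide (y = x)) := by
  cases b <;> simp

theorem fm_guard_cons {A B : Type} (p : A → Bool) (g : A → B) (x : A) (xs : List A) :
    List.filterMap (fun r => if p r then some (g r) else none) (x :: xs)
      = (if p x then [g x] else []) ++ List.filterMap (fun r => if p r then some (g r) else none) xs := by
  by_cases h : p x = true <;> simp [h]

theorem filter_guard_cons (p : String → Bool) (x : String) (xs : List String) :
    (x :: xs).filter p = (if p x then [x] else []) ++ xs.filter p := by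
  by_cases h : p x = true <;> simp [h]

theorem append_singleton_if (c : Bool) (l : List String) (a : String) :
    (if c then l ++ [a] else l) = l ++ (if c then [a] else []) := by
  cases c <;> simp

-- ===== VERDICT (by name: the statement is the Claim_ definition above) =====
set_option maxRecDepth 10000 in
theorem classify_keywords_spec : Claim_equal_classify_keywords := by
  intro keywords df_row _ _
  unfold Spec_classify_keywords classify_keywords classify_keywords_alt pvKeywordLabel pvOrder
  simp only [fm_guard_cons, List.filterMap_nil, List.append_nil, List.contains_append,
    contains_guard, filter_guard_cons, List.filter_nil,
    String.reduceBEq, String.reduceEq, beq_self_eq_true, decide_true, decide_false,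
    Bool.false_or, Bool.or_false, Bool.and_false, Bool.and_true,
    Bool.true_or,
    append_singleton_if, List.append_assoc, List.nil_append, Bool.or_assoc]
  generalize PySem.Str.isIn "normal" (PySem.Str.lower keywords) = b1
  generalize ((PySem.Str.isIn "diabetes" (PySem.Str.lower keywords) || (PySem.Str.isIn "diabetic" (PySem.Str.lower keywords) || PySem.Str.isIn "proliferative retinopathy" (PySem.Str.lower keywords))) && ((PySem.Dict.mk df_row).get? "D" == some 1)) = bD
  generalize (PySem.Str.isIn "glaucoma" (PySem.Str.lower keywords) && ((PySem.Dict.mk df_row).get? "G" == some 1)) = bG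
  generalize (PySem.Str.isIn "cataract" (PySem.Str.lower keywords) && ((PySem.Dict.mk df_row).get? "C" == some 1)) = bC
  generalize ((PySem.Str.isIn "amd" (PySem.Str.lower keywords) || PySem.Str.isIn "age-related macular degeneration" (PySem.Str.lower keywords)) && ((PySem.Dict.mk df_row).get? "A" == some 1)) = bA
  generalize ((PySem.Str.isIn "hypertension" (PySem.Str.lower keywords) || PySem.Str.isIn "hypertensive" (PySem.Str.lower keywords)) && ((PySem.Dict.mk df_row).get? "H" == some 1)) = bH
  generalize ((PySem.Str.isIn "myopia" (PySem.Str.lower keywords) || PySem.Str.isIn "myopic" (PySem.Str.lower keywords)) && ((PySem.Dict.mk df_row).get? "M" == some 1)) = bM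
  generalize (disease_names.any fun name => PySem.Str.isIn name (PySem.Str.lower keywords)) = bO
  revert b1 bD bG bC bA bH bM bO
  decide
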